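-- pv_equiv track=rewrite | github.com/jao399/resume-studio | tools/pdf-helper.py | consume_certificate_items
-- ===== SOURCE A (Python) =====
-- def consume_certificate_items(lines: list[str]) -> list[dict]:
--     if not lines:
--         return []
--     paragraphs: list[str] = []
--     current: list[str] = []
--     for line in lines:
--         current.append(line)
--         if line.endswith("."):
--             paragraphs.append(" ".join(current))
--             current = []
--     if current:
--         paragraphs.append(" ".join(current))
--
--     items: list[dict] = []
--     for paragraph in paragraphs:
--         parts = [part.strip() for part in paragraph.split(" - ") if part.strip()]
--         if len(parts) >= 2:
--             title = " - ".join(parts[:2]) if len(parts) > 2 else parts[0]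
--             description = " - ".join(parts[2:]) if len(parts) > 2 else parts[1]
--         else:
--             title = paragraph
--             description = ""
--         items.append({"title": title, "description": description})
--     return items
-- ===== SOURCE B (Python) =====
-- def _parse(paragraph):
--     parts = [p.strip() for p in paragraph.split(" - ") if p.strip()]
--     if len(parts) > 2:
--         return {"title": " - ".join(parts[:2]), "description": " - ".join(parts[2:])}
--     if len(parts) == 2:
--         return {"title": parts[0], "description": parts[1]}
--     return {"title": paragraph, "description": ""}
--
--
-- def consume_certificate_items(lines: list[str]) -> list[dict]:
--     if not lines:
--         return []
--     items: list[dict] = []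
--     rest = lines
--     while rest:
--         cut = 1
--         while cut < len(rest) and not rest[cut - 1].endswith("."):
--             cut += 1
--         items.append(_parse(" ".join(rest[:cut])))
--         rest = rest[cut:]
--     return items
-- ===== Notes on version B (the rewrite author's own statement) =====
-- stated objective: alternative
-- what changed: A buffers lines in `current` inside an event-driven fold, flushes on each '.' into a paragraphs list, and then parses that list in a second loop; B instead repeatedly scans ahead from the head of the remaining list to the first '.'-terminated line, slices that whole chunk off, and join-and-parses it immediately — no `current` buffer and no intermediate paragraphs list.
import Mathlib
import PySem

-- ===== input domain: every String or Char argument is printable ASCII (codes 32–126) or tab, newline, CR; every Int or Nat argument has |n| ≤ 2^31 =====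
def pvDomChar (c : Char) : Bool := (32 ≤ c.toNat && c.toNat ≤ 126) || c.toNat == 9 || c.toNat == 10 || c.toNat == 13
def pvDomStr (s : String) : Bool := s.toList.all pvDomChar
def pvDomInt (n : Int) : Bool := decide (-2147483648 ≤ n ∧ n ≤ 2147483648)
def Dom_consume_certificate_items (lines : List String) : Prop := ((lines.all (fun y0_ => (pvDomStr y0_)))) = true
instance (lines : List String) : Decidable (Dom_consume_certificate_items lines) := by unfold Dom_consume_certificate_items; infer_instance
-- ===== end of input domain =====

-- B replaces A's buffered fold plus second parsing loop by scan-ahead-and-slice chunking that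
-- parses each chunk as it is cut off; same cost, a different decomposition.

-- ===== PORT A =====
-- literal transliteration: first loop groups lines into paragraphs, second loop parses each paragraph
def consume_certificate_items (lines : List String) : List (List (String × String)) :=
  if lines = [] then []
  else
    let st := lines.foldl (fun (st : List String × List String) line =>
      let current := st.2 ++ [line]
      if PySem.Str.endswith line "." then (st.1 ++ [PySem.Str.join " " current], ([] : List String))
      else (st.1, current)) ([], [])
    let paragraphs := if st.2 ≠ [] then st.1 ++ [PySem.Str.join " " st.2] else st.1
    paragraphs.foldl (fun items paragraph =>
      let parts := ((PySem.Str.split? paragraph " - ").getD []).filterMap (fun part =>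
        let s := PySem.Str.strip part
        if s = "" then none else some s)
      let item :=
        if parts.length ≥ 2 then
          let title := if parts.length > 2 then PySem.Str.join " - " (parts.take 2) else parts.getD 0 ""
          let description := if parts.length > 2 then PySem.Str.join " - " (parts.drop 2) else parts.getD 1 ""
          [("title", title), ("description", description)]
        else
          [("title", paragraph), ("description", "")]
      items ++ [item]) []

-- ===== PORT B =====
-- B's helper _parse: flat three-way branch on the number of parts
def pvParse (paragraph : String) : List (String × String) :=
  let parts := ((PySem.Str.split? paragraph " - ").getD []).filterMap (fun part =>
    let s := PySem.Str.strip part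
    if s = "" then none else some s)
  if parts.length > 2 then
    [("title", PySem.Str.join " - " (parts.take 2)), ("description", PySem.Str.join " - " (parts.drop 2))]
  else if parts.length = 2 then
    [("title", parts.getD 0 ""), ("description", parts.getD 1 "")]
  else
    [("title", paragraph), ("description", "")]

-- B's inner scan: `cut` stops at len(rest) or at the first line (at index cut-1) ending with "."
def pvCut : List String → Nat
  | [] => 0
  | l :: ls => if ls = [] then 1 else if PySem.Str.endswith l "." then 1 else 1 + pvCut ls

lemma pvCut_pos (l : String) (ls : List String) : 1 ≤ pvCut (l :: ls) := by
  unfold pvCut; split_ifs <;> omega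

-- B's outer while loop: slice off the chunk rest[:cut], parse it, continue on rest[cut:]
def pvEmit (rest : List String) : List (List (String × String)) :=
  match rest with
  | [] => []
  | l :: ls =>
    let cut := pvCut (l :: ls)
    pvParse (PySem.Str.join " " ((l :: ls).take cut)) :: pvEmit ((l :: ls).drop cut)
termination_by rest.length
decreasing_by
  have := pvCut_pos l ls
  simp only [List.length_drop, List.length_cons]
  omega

def consume_certificate_items_alt (lines : List String) : List (List (String × String)) :=
  if lines = [] then [] else pvEmit lines

-- ===== PRECONDITION & SPEC =====
def Spec_consume_certificate_items (lines : List String) (out : List (List (String × String))) : Prop := out = consume_certificate_items_alt lines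
instance (lines : List String) (out : List (List (String × String))) : Decidable (Spec_consume_certificate_items lines out) := by unfold Spec_consume_certificate_items; infer_instance

-- ===== CLAIM (what is proved, stated in full; the proofs are below) =====
def Claim_equal_consume_certificate_items : Prop := ∀ (lines : List String), Dom_consume_certificate_items lines → Spec_consume_certificate_items lines (consume_certificate_items lines)

-- ===== LEMMAS AND PROOFS =====

-- proof-side names for A's two loops (definitionally the lambdas in the port)
def foldA (lines : List String) (st : List String × List String) : List String × List String :=
  lines.foldl (fun (st : List String × List String) line =>
    let current := st.2 ++ [line]
    if PySem.Str.endswith line "." then (st.1 ++ [PySem.Str.join " " current], ([] : List String))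
    else (st.1, current)) st

def finishA (st : List String × List String) : List String :=
  if st.2 ≠ [] then st.1 ++ [PySem.Str.join " " st.2] else st.1

-- A's inline parse of one paragraph equals B's helper
lemma itemA_eq_pvParse (paragraph : String) :
    (let parts := ((PySem.Str.split? paragraph " - ").getD []).filterMap (fun part =>
        let s := PySem.Str.strip part
        if s = "" then none else some s)
      if parts.length ≥ 2 then
        [("title", if parts.length > 2 then PySem.Str.join " - " (parts.take 2) else parts.getD 0 ""),
         ("description", if parts.length > 2 then PySem.Str.join " - " (parts.drop 2) else parts.getD 1 "")]
      else
        [("title", paragraph), ("description", "")]) = pvParse paragraph := by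
  unfold pvParse
  simp only []
  split_ifs with h1 h2 h3 h4 h5 <;> first | rfl | omega

-- A's second loop is mapping the parse over the paragraphs
lemma foldl_append_map {α β : Type} (g : α → β) (xs : List α) (init : List β) :
    xs.foldl (fun acc x => acc ++ [g x]) init = init ++ xs.map g := by
  induction xs generalizing init with
  | nil => simp
  | cons x xs ih => simp [List.foldl, ih]

-- the accumulated paragraphs prefix factors out of A's fold
lemma foldA_acc (lines : List String) (ps cur : List String) :
    foldA lines (ps, cur) = (ps ++ (foldA lines ([], cur)).1, (foldA lines ([], cur)).2) := by
  induction lines generalizing ps cur with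
  | nil => simp [foldA]
  | cons l ls ih =>
    simp only [foldA, List.foldl] at *
    by_cases h : PySem.Str.endswith l "." = true
    · simp only [h, if_pos, List.nil_append]
      rw [ih (ps ++ [PySem.Str.join " " (cur ++ [l])]) [], ih [PySem.Str.join " " (cur ++ [l])] []]
      simp
    · simp only [h]
      exact ih ps (cur ++ [l])

lemma pvCut_append_term (cur : List String) (l : String) (ls : List String)
    (hcur : ∀ x ∈ cur, PySem.Str.endswith x "." = false)
    (hl : PySem.Str.endswith l "." = true) :
    pvCut (cur ++ l :: ls) = cur.length + 1 := by
  induction cur with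
  | nil =>
    have h2 : PySem.Chars.endswith l.toList ['.'] = true := by simpa using hl
    simp [pvCut, h2]
  | cons c cs ih =>
    have hc : PySem.Str.endswith c "." = false := hcur c (by simp)
    have hne : cs ++ l :: ls ≠ [] := by simp
    simp only [List.cons_append, pvCut, hne, if_false, hc]
    rw [ih (fun x hx => hcur x (by simp [hx]))]
    simp; omega

lemma pvCut_all_nonterm (cur : List String) (h : ∀ x ∈ cur, PySem.Str.endswith x "." = false)
    (hne : cur ≠ []) : pvCut cur = cur.length := by
  induction cur with
  | nil => simp at hne
  | cons c cs ih =>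
    by_cases hcs : cs = []
    · simp [pvCut, hcs]
    · have hc : PySem.Str.endswith c "." = false := h c (by simp)
      simp only [pvCut, hcs, if_false, hc]
      rw [ih (fun x hx => h x (by simp [hx])) hcs]
      simp; omega

lemma pv_take_len_succ {α : Type} (xs : List α) (y : α) (ys : List α) :
    (xs ++ y :: ys).take (xs.length + 1) = xs ++ [y] := by
  induction xs <;> simp_all

lemma pv_drop_len_succ {α : Type} (xs : List α) (y : α) (ys : List α) :
    (xs ++ y :: ys).drop (xs.length + 1) = ys := by
  induction xs <;> simp_all

lemma pvEmit_cons (l : String) (ls : List String) :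
    pvEmit (l :: ls) = pvParse (PySem.Str.join " " ((l :: ls).take (pvCut (l :: ls)))) ::
      pvEmit ((l :: ls).drop (pvCut (l :: ls))) := by
  rw [pvEmit.eq_def]

lemma pvEmit_chunk (cur : List String) (l : String) (ls : List String)
    (hcur : ∀ x ∈ cur, PySem.Str.endswith x "." = false)
    (hl : PySem.Str.endswith l "." = true) :
    pvEmit (cur ++ l :: ls) = pvParse (PySem.Str.join " " (cur ++ [l])) :: pvEmit ls := by
  have hcut := pvCut_append_term cur l ls hcur hl
  cases cur with
  | nil =>
    simp only [List.nil_append] at hcut ⊢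
    rw [pvEmit_cons]; simp at hcut; simp [hcut]
  | cons c cs =>
    rw [List.cons_append, pvEmit_cons]
    simp only [List.cons_append] at hcut
    rw [hcut]
    have ht : ((c :: cs) ++ l :: ls).take ((c :: cs).length + 1) = (c :: cs) ++ [l] :=
      pv_take_len_succ (c :: cs) l ls
    have hd : ((c :: cs) ++ l :: ls).drop ((c :: cs).length + 1) = ls :=
      pv_drop_len_succ (c :: cs) l ls
    simp only [List.cons_append] at ht hd
    rw [ht, hd]
    simp

lemma pvEmit_nonterm (cur : List String) (h : ∀ x ∈ cur, PySem.Str.endswith x "." = false)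
    (hne : cur ≠ []) : pvEmit cur = [pvParse (PySem.Str.join " " cur)] := by
  cases cur with
  | nil => simp at hne
  | cons c cs =>
    rw [pvEmit_cons]
    rw [pvCut_all_nonterm (c :: cs) h hne]
    simp [pvEmit]

-- main invariant: parsing A's finished paragraphs equals B's chunking of the pending buffer ++ rest
lemma main_inv (lines : List String) : ∀ cur : List String,
    (∀ x ∈ cur, PySem.Str.endswith x "." = false) →
    (finishA (foldA lines ([], cur))).map pvParse = pvEmit (cur ++ lines) := by
  induction lines with
  | nil =>
    intro cur hcur
    by_cases hne : cur = []
    · simp [hne, foldA, finishA, pvEmit]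
    · simp only [foldA, List.foldl, finishA, List.append_nil]
      simp only [hne, ne_eq, not_false_eq_true, if_true]
      rw [pvEmit_nonterm cur hcur hne]
      simp
  | cons l ls ih =>
    intro cur hcur
    by_cases h : PySem.Str.endswith l "." = true
    · have h2 : PySem.Chars.endswith l.toList ['.'] = true := by simpa using h
      have step : foldA (l :: ls) ([], cur) = foldA ls ([PySem.Str.join " " (cur ++ [l])], []) := by
        simp [foldA, List.foldl, h2]
      rw [step, foldA_acc]
      have hfin : finishA ([PySem.Str.join " " (cur ++ [l])] ++ (foldA ls ([], [])).1,
          (foldA ls ([], [])).2) = [PySem.Str.join " " (cur ++ [l])] ++ finishA (foldA ls ([], [])) := by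
        unfold finishA; split_ifs <;> simp
      rw [hfin, List.map_append]
      rw [ih [] (by simp)]
      rw [pvEmit_chunk cur l ls hcur h]
      simp
    · have h2 : ¬ PySem.Chars.endswith l.toList ['.'] = true := by simpa using h
      have step : foldA (l :: ls) ([], cur) = foldA ls ([], cur ++ [l]) := by
        simp [foldA, List.foldl, h2]
      rw [step, ih (cur ++ [l]) (by
        intro x hx
        rcases List.mem_append.mp hx with hx | hx
        · exact hcur x hx
        · simp at hx; subst hx; simpa using h)]
      simp

-- ===== VERDICT (by name: the statement is the Claim_ definition above) =====
theorem consume_certificate_items_spec : Claim_equal_consume_certificate_items := by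
  intro lines _
  unfold Spec_consume_certificate_items consume_certificate_items consume_certificate_items_alt
  by_cases hnil : lines = []
  · simp [hnil]
  · simp only [hnil, if_false]
    have h := main_inv lines [] (by simp)
    simp only [List.nil_append] at h
    rw [← h]
    show (finishA (foldA lines ([], []))).foldl _ [] = _
    rw [show (fun (items : List (List (String × String))) paragraph =>
      items ++ [(let parts := ((PySem.Str.split? paragraph " - ").getD []).filterMap (fun part =>
          let s := PySem.Str.strip part
          if s = "" then none else some s)
        if parts.length ≥ 2 then
          [("title", if parts.length > 2 then PySem.Str.join " - " (parts.take 2) else parts.getD 0 ""),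
           ("description", if parts.length > 2 then PySem.Str.join " - " (parts.drop 2) else parts.getD 1 "")]
        else
          [("title", paragraph), ("description", "")])]) = fun items paragraph => items ++ [pvParse paragraph]
      from funext fun items => funext fun paragraph => by rw [itemA_eq_pvParse]]
    rw [foldl_append_map pvParse _ []]
    simp
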